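-- pv_equiv track=rewrite | github.com/jamesyu-git/yu-chunhao-question-1 | main.py | function
-- ===== SOURCE A (Python) =====
-- def function(array):
--     if len(array) < 2:
--         return -1
--
--     direction = 0
--
--     for i in range(1, len(array)):
--         if array[i] > array[i - 1]:
--             if direction == -1:
--                 return i - 1
--             direction = 1
--         elif array[i] < array[i - 1]:
--             if direction == 1:
--                 return i - 1
--             direction = -1
--
--     return -1
-- ===== SOURCE B (Python) =====
-- def function(array):
--     nz = [(j, array[j + 1] > array[j])
--           for j in range(len(array) - 1)
--           if array[j + 1] != array[j]]
--     return next((j for (_, ps), (j, s) in zip(nz, nz[1:]) if s != ps), -1)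
-- ===== Notes on version B (the rewrite author's own statement) =====
-- stated objective: simpler
-- what changed: B has no direction state variable or early-exit index loop: it builds the filtered list of strictly-unequal adjacent pairs (index, is-increasing) by a comprehension and returns the index of the first adjacent pair of that filtered list whose directions disagree, via zip/next.
import Mathlib
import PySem

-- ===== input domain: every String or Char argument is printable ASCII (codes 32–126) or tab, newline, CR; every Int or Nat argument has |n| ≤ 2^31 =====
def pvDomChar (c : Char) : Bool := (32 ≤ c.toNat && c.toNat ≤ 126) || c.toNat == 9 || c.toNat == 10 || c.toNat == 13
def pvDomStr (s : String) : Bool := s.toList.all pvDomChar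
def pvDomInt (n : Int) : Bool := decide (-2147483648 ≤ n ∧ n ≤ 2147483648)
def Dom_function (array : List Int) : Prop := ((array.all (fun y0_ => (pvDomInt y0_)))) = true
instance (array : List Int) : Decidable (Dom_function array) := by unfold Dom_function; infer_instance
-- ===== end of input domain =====

-- B replaces A's stateful scan by a filter of the strictly-unequal adjacent pairs and a
-- first-adjacent-disagreement search over that filtered list (objective: simpler; same cost).

-- ===== PORT A =====
-- the 'for i in range(1, len(array))' loop with early return, as index recursion
def functionLoop (array : List Int) (i : Nat) (direction : Int) : Int :=
  if _h : i < array.length then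
    if array.getD i 0 > array.getD (i - 1) 0 then
      if direction = -1 then (i : Int) - 1
      else functionLoop array (i + 1) 1
    else if array.getD i 0 < array.getD (i - 1) 0 then
      if direction = 1 then (i : Int) - 1
      else functionLoop array (i + 1) (-1)
    else functionLoop array (i + 1) direction
  else -1
termination_by array.length - i

def function (array : List Int) : Int :=
  if array.length < 2 then -1
  else functionLoop array 1 0

-- ===== PORT B =====
-- the comprehension '[(j, array[j+1] > array[j]) for j in range(len(array)-1) if array[j+1] != array[j]]'
-- (range(len(array)-1) ported as List.range; Nat truncated subtraction matches since the bound is ≥ 0)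
def nzList (array : List Int) : List (Nat × Bool) :=
  ((List.range (array.length - 1)).filter
      (fun j => array.getD (j + 1) 0 ≠ array.getD j 0)).map
    (fun j => (j, decide (array.getD (j + 1) 0 > array.getD j 0)))

-- the 'next((j for (_, ps), (j, s) in zip(nz, nz[1:]) if s != ps), -1)' generator search
def findRev : List ((Nat × Bool) × (Nat × Bool)) → Int
  | [] => -1
  | ((_, ps), (j, s)) :: rest => if s ≠ ps then (j : Int) else findRev rest

def function_alt (array : List Int) : Int :=
  let nz := nzList array
  findRev (nz.zip nz.tail)

-- ===== PRECONDITION & SPEC =====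
def Spec_function (array : List Int) (out : Int) : Prop := out = function_alt array
instance (array : List Int) (out : Int) : Decidable (Spec_function array out) := by unfold Spec_function; infer_instance

-- ===== CLAIM (what is proved, stated in full; the proofs are below) =====
def Claim_equal_function : Prop := ∀ (array : List Int), Dom_function array → Spec_function array (function array)

-- ===== LEMMAS AND PROOFS =====

-- the suffix of nzList starting at pair index k
def nzFrom (array : List Int) (k : Nat) : List (Nat × Bool) :=
  ((List.range' k (array.length - 1 - k)).filter
      (fun j => array.getD (j + 1) 0 ≠ array.getD j 0)).map
    (fun j => (j, decide (array.getD (j + 1) 0 > array.getD j 0)))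

theorem nzFrom_zero (array : List Int) : nzFrom array 0 = nzList array := by
  simp [nzFrom, nzList, List.range_eq_range']

theorem nzFrom_ge (array : List Int) (k : Nat) (h : array.length - 1 ≤ k) :
    nzFrom array k = [] := by
  simp [nzFrom, Nat.sub_eq_zero_of_le h]

theorem nzFrom_step (array : List Int) (k : Nat) (h : k < array.length - 1) :
    nzFrom array k =
      if array.getD (k + 1) 0 ≠ array.getD k 0 then
        (k, decide (array.getD (k + 1) 0 > array.getD k 0)) :: nzFrom array (k + 1)
      else nzFrom array (k + 1) := by
  have hm : array.length - 1 - k = (array.length - 1 - (k + 1)) + 1 := by omega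
  rw [nzFrom, hm, List.range'_succ, List.filter_cons]
  by_cases hc : array.getD (k + 1) 0 = array.getD k 0
  all_goals simp only [List.getD_eq_getElem?_getD] at hc
  · simp [hc, nzFrom]
  · simp [hc, Ne.symm hc, nzFrom]

-- A's loop body replayed over the nonzero-sign list (true = increasing)
def G : List (Nat × Bool) → Int → Int
  | [], _ => -1
  | (j, s) :: rest, d =>
    if s then (if d = -1 then (j : Int) else G rest 1)
    else (if d = 1 then (j : Int) else G rest (-1))

theorem loop_eq (array : List Int) : ∀ (n i : Nat) (d : Int), array.length - i ≤ n → 1 ≤ i →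
    functionLoop array i d = G (nzFrom array (i - 1)) d := by
  intro n
  induction n with
  | zero =>
    intro i d hle hi
    rw [functionLoop, dif_neg (by omega), nzFrom_ge array (i - 1) (by omega), G]
  | succ n ih =>
    intro i d hle hi
    rw [functionLoop]
    by_cases hlt : i < array.length
    · rw [dif_pos hlt]
      have hstep := nzFrom_step array (i - 1) (by omega)
      have hi1 : i - 1 + 1 = i := by omega
      rw [hi1] at hstep
      have hcast : ((i - 1 : Nat) : Int) = (i : Int) - 1 := by omega
      by_cases hgt : array.getD i 0 > array.getD (i - 1) 0
      · have hne : array.getD i 0 ≠ array.getD (i - 1) 0 := by omega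
        rw [hstep, if_pos hne]
        simp only [if_pos hgt, G, decide_eq_true hgt, if_pos, hcast]
        by_cases hd : d = -1
        · simp [hd]
        · rw [if_neg hd, if_neg hd]
          simpa using ih (i + 1) 1 (by omega) (by omega)
      · rw [if_neg hgt]
        by_cases hltv : array.getD i 0 < array.getD (i - 1) 0
        · have hne : array.getD i 0 ≠ array.getD (i - 1) 0 := by omega
          rw [hstep, if_pos hne, if_pos hltv]
          have hs : decide (array.getD (i - 1 + 1) 0 > array.getD (i - 1) 0) = false := by
            rw [hi1]; exact decide_eq_false (by omega)
          rw [hi1] at hs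
          simp only [G, hs, Bool.false_eq_true, if_false, hcast]
          by_cases hd : d = 1
          · simp [hd]
          · rw [if_neg hd, if_neg hd]
            simpa using ih (i + 1) (-1) (by omega) (by omega)
        · have heq : array.getD i 0 = array.getD (i - 1) 0 := by omega
          rw [if_neg hltv, hstep, if_neg (by simpa using heq)]
          simpa using ih (i + 1) d (by omega) (by omega)
    · rw [dif_neg hlt, nzFrom_ge array (i - 1) (by omega), G]

-- first element of l whose direction differs from b
def firstDiff : List (Nat × Bool) → Bool → Int
  | [], _ => -1
  | (j, s) :: rest, b => if s ≠ b then (j : Int) else firstDiff rest b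

theorem G_fixed (l : List (Nat × Bool)) : ∀ (b : Bool),
    G l (if b then 1 else -1) = firstDiff l b := by
  induction l with
  | nil => intro b; cases b <;> rfl
  | cons x t ih =>
    intro b
    obtain ⟨j, s⟩ := x
    cases b <;> cases s <;> simp [G, firstDiff, ← ih] <;> rfl

theorem findRev_zip (l : List (Nat × Bool)) : ∀ (j : Nat) (b : Bool),
    findRev (List.zip ((j, b) :: l) l) = firstDiff l b := by
  induction l with
  | nil => intro j b; rfl
  | cons x t ih =>
    intro j b
    obtain ⟨j1, b1⟩ := x
    simp only [List.zip_cons_cons, findRev, firstDiff]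
    by_cases h : b1 = b
    · simp [h, ih]
    · simp [h]

theorem G_eq_findRev (l : List (Nat × Bool)) :
    G l 0 = findRev (l.zip l.tail) := by
  cases l with
  | nil => rfl
  | cons x t =>
    obtain ⟨j, s⟩ := x
    have h1 : G ((j, s) :: t) 0 = G t (if s then 1 else -1) := by
      cases s <;> simp [G]
    rw [h1, G_fixed, List.tail_cons, findRev_zip]

-- ===== VERDICT (by name: the statement is the Claim_ definition above) =====
theorem function_spec : Claim_equal_function := by
  intro array _
  unfold Spec_function function function_alt
  by_cases h : array.length < 2
  · have hnz : nzList array = [] := by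
      rw [← nzFrom_zero]; exact nzFrom_ge array 0 (by omega)
    simp [h, hnz, findRev]
  · rw [if_neg h, loop_eq array array.length 1 0 (by omega) (by omega), nzFrom_zero,
      G_eq_findRev]
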